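-- pv_equiv track=rewrite | github.com/jeanbaptistemora/fluidattacks-universe2 | app/domain/finding.py | get_tracking_dict
-- ===== SOURCE A (Python) =====
-- def get_tracking_dict(unique_dict):
--     """Get tracking dictionary."""
--     sorted_dates = sorted(unique_dict.keys())
--     tracking_dict = {}
--     if sorted_dates:
--         tracking_dict[sorted_dates[0]] = unique_dict[sorted_dates[0]]
--         for date in range(1, len(sorted_dates)):
--             prev_date = sorted_dates[date - 1]
--             tracking_dict[sorted_dates[date]] = tracking_dict[prev_date].copy()
--             actual_date_dict = unique_dict[sorted_dates[date]].items()
--             for vuln, state in actual_date_dict: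
--                 tracking_dict[sorted_dates[date]][vuln] = state
--     return tracking_dict
-- ===== SOURCE B (Python) =====
-- def get_tracking_dict(unique_dict):
--     """Get tracking dictionary."""
--     dates = sorted(unique_dict)
--     tracking = {date: {} for date in dates}
--     for i, date in enumerate(dates):
--         for later in dates[i:]:
--             tracking[later].update(unique_dict[date])
--     return tracking
-- ===== Notes on version B (the rewrite author's own statement) =====
-- stated objective: alternative
-- what changed: Instead of building each snapshot from a copy of the previous snapshot read back from the output, B pre-creates all snapshots empty and scatters each date's states forward into every snapshot at that date or later (a write-forward broadcast), never reading a previous snapshot.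
import Mathlib
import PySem

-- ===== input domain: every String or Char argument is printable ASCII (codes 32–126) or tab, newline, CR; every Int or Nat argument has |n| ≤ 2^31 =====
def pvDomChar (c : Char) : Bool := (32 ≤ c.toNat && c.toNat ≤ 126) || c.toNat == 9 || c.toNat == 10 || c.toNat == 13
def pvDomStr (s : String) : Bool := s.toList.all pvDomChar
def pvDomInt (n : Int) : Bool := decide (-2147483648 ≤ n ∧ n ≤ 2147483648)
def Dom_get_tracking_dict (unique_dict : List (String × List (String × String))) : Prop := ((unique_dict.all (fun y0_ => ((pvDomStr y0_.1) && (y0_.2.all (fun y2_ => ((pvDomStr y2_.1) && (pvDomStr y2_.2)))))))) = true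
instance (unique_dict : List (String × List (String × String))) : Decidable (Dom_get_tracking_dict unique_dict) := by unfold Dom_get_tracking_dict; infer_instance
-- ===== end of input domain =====

-- B replaces A's incremental copy-previous-snapshot-and-update loop by a write-forward
-- broadcast: all snapshots start empty and each date's states are scattered into every
-- snapshot at that date or later; objective: alternative (B never reads a previous snapshot).

-- ===== PORT A =====
-- A's index loop body: date ranges over range(1, len(sorted_dates)); the previous
-- snapshot is looked up in tracking_dict, copied, and updated with the current date's items.
def pvStepA (ud : PySem.Dict String (PySem.Dict String String)) (ds : List String)
    (tracking : PySem.Dict String (PySem.Dict String String)) (date : Int) :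
    PySem.Dict String (PySem.Dict String String) :=
  let prev_date := PySem.List.pyGetD ds (date - 1) ""
  let cur := PySem.List.pyGetD ds date ""
  let copied := tracking.getD prev_date PySem.Dict.empty
  let updated := ((ud.getD cur PySem.Dict.empty).items).foldl (fun d p => d.insert p.1 p.2) copied
  tracking.insert cur updated

def get_tracking_dict (unique_dict : List (String × List (String × String))) : List (String × List (String × String)) :=
  let ud : PySem.Dict String (PySem.Dict String String) :=
    PySem.Dict.ofList (unique_dict.map (fun p => (p.1, PySem.Dict.ofList p.2)))
  let sorted_dates := PySem.List.sorted ud.keys (fun x => x) false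
  let tracking : PySem.Dict String (PySem.Dict String String) :=
    match sorted_dates with
    | [] => PySem.Dict.empty
    | d0 :: _ =>
      let t0 := (PySem.Dict.empty).insert d0 (ud.getD d0 PySem.Dict.empty)
      (PySem.List.pyRange 1 (sorted_dates.length : Int) 1).foldl (pvStepA ud sorted_dates) t0
  tracking.items.map (fun p => (p.1, p.2.items))

-- ===== PORT B =====
-- B: tracking = {date: {} for date in dates}; then for i, date in enumerate(dates):
-- for later in dates[i:]: tracking[later].update(unique_dict[date]).
-- tracking[later] always exists (later is a key of tracking), so the mutating
-- 'tracking[later].update(...)' is ported exactly as insert of the updated inner dict.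
def get_tracking_dict_alt (unique_dict : List (String × List (String × String))) : List (String × List (String × String)) :=
  let ud : PySem.Dict String (PySem.Dict String String) :=
    PySem.Dict.ofList (unique_dict.map (fun p => (p.1, PySem.Dict.ofList p.2)))
  let dates := PySem.List.sorted ud.keys (fun x => x) false
  let t0 : PySem.Dict String (PySem.Dict String String) :=
    dates.foldl (fun t d => t.insert d PySem.Dict.empty) PySem.Dict.empty
  let tracking := (PySem.List.enumerate dates).foldl
    (fun t pr => (PySem.List.slice dates (some pr.1) none).foldl
      (fun t later =>
        t.insert later ((t.getD later PySem.Dict.empty).update (ud.getD pr.2 PySem.Dict.empty).items)) t) t0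
  tracking.items.map (fun p => (p.1, p.2.items))

-- ===== PRECONDITION & SPEC =====
def Spec_get_tracking_dict (unique_dict : List (String × List (String × String))) (out : List (String × List (String × String))) : Prop := out = get_tracking_dict_alt unique_dict
instance (unique_dict : List (String × List (String × String))) (out : List (String × List (String × String))) : Decidable (Spec_get_tracking_dict unique_dict out) := by unfold Spec_get_tracking_dict; infer_instance

-- ===== CLAIM (what is proved, stated in full; the proofs are below) =====
def Claim_equal_get_tracking_dict : Prop := ∀ (unique_dict : List (String × List (String × String))), Dom_get_tracking_dict unique_dict → Spec_get_tracking_dict unique_dict (get_tracking_dict unique_dict)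

-- ===== LEMMAS AND PROOFS =====

-- acc updated with ud[date] (what both programs do to one snapshot for one date)
def pvUpd (ud : PySem.Dict String (PySem.Dict String String)) (acc : PySem.Dict String String)
    (date : String) : PySem.Dict String String :=
  acc.update (ud.getD date PySem.Dict.empty).items

-- the list of snapshots for the given dates, starting from accumulated state acc
def pvSnaps (ud : PySem.Dict String (PySem.Dict String String)) (acc : PySem.Dict String String) :
    List String → List (String × PySem.Dict String String)
  | [] => []
  | d :: rest => (d, pvUpd ud acc d) :: pvSnaps ud (pvUpd ud acc d) rest

-- A's loop recast as a fold carrying (tracking, current accumulator) over the date tail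
def pvStepSeq (ud : PySem.Dict String (PySem.Dict String String))
    (st : PySem.Dict String (PySem.Dict String String) × PySem.Dict String String)
    (date : String) :
    PySem.Dict String (PySem.Dict String String) × PySem.Dict String String :=
  let acc' := ((ud.getD date PySem.Dict.empty).items).foldl (fun d p => d.insert p.1 p.2) st.2
  (st.1.insert date acc', acc')

-- every value stored by an insert-fold came from the fold's pair list or the start dict
lemma pv_mem_items_foldl (l : List (String × PySem.Dict String String)) :
    ∀ (d : PySem.Dict String (PySem.Dict String String)) p,
      p ∈ (l.foldl (fun d q => d.insert q.1 q.2) d).items → p ∈ d.items ∨ p.2 ∈ l.map (·.2) := by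
  induction l with
  | nil => intro d p h; exact Or.inl h
  | cons q l ih =>
    intro d p h
    rcases ih (d.insert q.1 q.2) p h with h' | h'
    · rcases (PySem.Dict.mem_items_insert _ _ _ _).mp h' with h'' | h''
      · subst h''; exact Or.inr (by simp)
      · exact Or.inl h''.1
    · exact Or.inr (by rw [List.map_cons]; exact List.mem_cons_of_mem _ h')

-- inner dicts built by the ports have unique keys
lemma pv_val_keys_nodup (unique_dict : List (String × List (String × String))) (date : String) :
    ((PySem.Dict.ofList (unique_dict.map (fun p => (p.1, PySem.Dict.ofList p.2)))).getD date
      PySem.Dict.empty).keys.Nodup := by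
  set ud := PySem.Dict.ofList (unique_dict.map (fun p => (p.1, PySem.Dict.ofList p.2))) with hud
  rcases h : ud.get? date with _ | w
  · rw [PySem.Dict.getD_eq_get?_getD, h]; simp
  · rw [PySem.Dict.getD_eq_get?_getD, h]
    simp only [Option.getD_some]
    have hw : (date, w) ∈ ud.items := PySem.Dict.mem_items_of_get?_eq_some _ h
    have : (date, w) ∈ (PySem.Dict.empty : PySem.Dict String (PySem.Dict String String)).items ∨
        w ∈ (unique_dict.map (fun p => (p.1, PySem.Dict.ofList p.2))).map (·.2) :=
      pv_mem_items_foldl _ _ _ hw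
    rcases this with h' | h'
    · simp [PySem.Dict.empty] at h'
    · simp only [List.map_map, List.mem_map, Function.comp] at h'
      obtain ⟨q, _, hq⟩ := h'
      rw [← hq]
      exact PySem.Dict.nodup_keys_ofList _

-- re-inserting a unique-keyed dict's items into the empty dict reconstructs it
lemma pv_update_empty (v : PySem.Dict String String) (h : v.keys.Nodup) :
    (PySem.Dict.empty : PySem.Dict String String).update v.items = v := by
  apply PySem.Dict.ext
  have := PySem.Dict.items_foldl_insert_fresh (l := v.items) (k := fun p => p.1) (v := fun p => p.2)
      (d := (PySem.Dict.empty : PySem.Dict String String)) (by intro a _; simp) h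
  simpa [PySem.Dict.update] using this

-- INNER LOOP of B: inserting the updated snapshot at every key of suf (all present, all
-- distinct, all carrying acc) rewrites exactly those entries in place
lemma pv_inner (its : List (String × String)) (suf : List String) :
    ∀ (A : List (String × PySem.Dict String String)) (acc : PySem.Dict String String)
      (t : PySem.Dict String (PySem.Dict String String)),
      ((A.map (·.1)) ++ suf).Nodup →
      t.items = A ++ suf.map (fun d => (d, acc)) →
      (suf.foldl (fun t later =>
          t.insert later ((t.getD later PySem.Dict.empty).update its)) t).items
        = A ++ suf.map (fun d => (d, acc.update its)) := by
  induction suf with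
  | nil => intro A acc t _ ht; simpa using ht
  | cons later suf ih =>
    intro A acc t hn ht
    have hkeys : t.keys = A.map (·.1) ++ later :: suf := by
      simp [PySem.Dict.keys, ht, Function.comp_def]
    have hndk : t.keys.Nodup := by rw [hkeys]; exact hn
    have hmem : (later, acc) ∈ t.items := by rw [ht]; simp
    have hget : t.getD later PySem.Dict.empty = acc := PySem.Dict.getD_of_mem_items _ hmem hndk _
    have hcont : t.contains later = true := by
      rw [PySem.Dict.contains_iff_mem_keys, hkeys]; simp
    have hAnotin : ∀ p ∈ A, p.1 ≠ later := by
      intro p hp heq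
      have h1 : p.1 ∈ A.map (·.1) := List.mem_map.mpr ⟨p, hp, rfl⟩
      exact (List.nodup_append.mp hn).2.2 p.1 h1 later List.mem_cons_self heq
    have hsufne : ∀ d ∈ suf, d ≠ later := by
      intro d hd heq
      have := (List.nodup_append.mp hn).2.1
      rw [List.nodup_cons] at this
      exact this.1 (heq ▸ hd)
    simp only [List.foldl_cons]
    rw [ih (A ++ [(later, acc.update its)]) acc
        (t.insert later ((t.getD later PySem.Dict.empty).update its))
        (by
          have : (A ++ [(later, acc.update its)]).map (·.1) ++ suf
              = A.map (·.1) ++ later :: suf := by simp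
          rw [this]; exact hn)
        (by
          rw [hget, PySem.Dict.items_insert, if_pos hcont, ht]
          rw [List.map_append, List.map_cons]
          have hA : A.map (fun p => if p.1 == later then (later, acc.update its) else p) = A := by
            rw [List.map_congr_left (g := id) (fun p hp => by
              simp [hAnotin p hp])]
            exact List.map_id A
          have hsuf : (suf.map (fun d => (d, acc))).map
              (fun p => if p.1 == later then (later, acc.update its) else p)
              = suf.map (fun d => (d, acc)) := by
            rw [List.map_map]
            exact List.map_congr_left (fun d hd => by simp [hsufne d hd])
          simp only [List.map_cons]
          rw [hA, hsuf]
          simp)]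
    simp
-- OUTER LOOP of B: after the dates in pre are processed, the finished snapshots are
-- 'done' and every remaining entry holds the accumulated state acc; processing the rest
-- appends exactly the remaining snapshots
lemma pv_outer (ud : PySem.Dict String (PySem.Dict String String)) (ds : List String)
    (hnd : ds.Nodup) (suf : List String) :
    ∀ (pre : List String) (done : List (String × PySem.Dict String String))
      (acc : PySem.Dict String String) (t : PySem.Dict String (PySem.Dict String String)),
      ds = pre ++ suf → done.map (·.1) = pre →
      t.items = done ++ suf.map (fun d => (d, acc)) →
      ((PySem.List.enumerate suf (pre.length : Int)).foldl
        (fun t pr => (PySem.List.slice ds (some pr.1) none).foldl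
          (fun t later =>
            t.insert later ((t.getD later PySem.Dict.empty).update (ud.getD pr.2 PySem.Dict.empty).items)) t)
        t).items
      = done ++ pvSnaps ud acc suf := by
  induction suf with
  | nil => intro pre done acc t _ _ ht; simpa [PySem.List.enumerate_nil, pvSnaps] using ht
  | cons date rest ih =>
    intro pre done acc t hds hdone ht
    rw [PySem.List.enumerate_cons]
    simp only [List.foldl_cons]
    have hslice : PySem.List.slice ds (some ((pre.length : Nat) : Int)) none = date :: rest := by
      rw [PySem.List.slice_from_natCast, hds, List.drop_left]
    rw [hslice]
    have hnod : (done.map (·.1) ++ date :: rest).Nodup := by rw [hdone, ← hds]; exact hnd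
    have hinner := pv_inner ((ud.getD date PySem.Dict.empty).items) (date :: rest) done acc t hnod ht
    have hcast : ((pre.length : Int) + 1) = (((pre ++ [date]).length : Nat) : Int) := by
      simp [List.length_append]
    rw [hcast]
    rw [ih (pre ++ [date]) (done ++ [(date, acc.update (ud.getD date PySem.Dict.empty).items)])
        (acc.update (ud.getD date PySem.Dict.empty).items) _
        (by rw [hds]; simp)
        (by simp [hdone])
        (by rw [hinner]; simp)]
    simp [pvSnaps, pvUpd]

-- A's sequential loop: inserting fresh keys appends the remaining snapshots
lemma pv_seq (ud : PySem.Dict String (PySem.Dict String String)) (rest : List String) :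
    ∀ (t : PySem.Dict String (PySem.Dict String String)) (acc : PySem.Dict String String),
      (∀ d ∈ rest, t.contains d = false) → rest.Nodup →
      ((rest.foldl (pvStepSeq ud) (t, acc)).1).items = t.items ++ pvSnaps ud acc rest := by
  induction rest with
  | nil => intro t acc _ _; simp [pvSnaps]
  | cons date rest ih =>
    intro t acc hfresh hnd
    simp only [List.foldl_cons]
    have hacc : ((ud.getD date PySem.Dict.empty).items).foldl (fun d p => d.insert p.1 p.2) acc
        = pvUpd ud acc date := rfl
    have hfresh' : ∀ d ∈ rest, (t.insert date (pvUpd ud acc date)).contains d = false := by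
      intro d hd
      rw [PySem.Dict.contains_insert]
      have hne : d ≠ date := by
        rw [List.nodup_cons] at hnd
        intro h; exact hnd.1 (h ▸ hd)
      simp [hne, hfresh d (List.mem_cons_of_mem _ hd)]
    have := ih (t.insert date (pvUpd ud acc date)) (pvUpd ud acc date) hfresh'
        ((List.nodup_cons.mp hnd).2)
    rw [show pvStepSeq ud (t, acc) date = (t.insert date (pvUpd ud acc date), pvUpd ud acc date) from rfl]
    rw [this, PySem.Dict.items_insert, if_neg (by simp [hfresh date List.mem_cons_self])]
    simp [pvSnaps]

-- After k loop steps of A, the sequential fold's tracking equals A's, and its accumulator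
-- is the snapshot A's next step would look up: the value stored at key ds[k].
lemma pv_loop_eq (ud : PySem.Dict String (PySem.Dict String String)) (d0 : String)
    (rest : List String) (k : Nat) (hk : k ≤ rest.length) :
    let ds := d0 :: rest
    let acc0 := ud.getD d0 PySem.Dict.empty
    let t0 := (PySem.Dict.empty).insert d0 acc0
    let B := (rest.take k).foldl (pvStepSeq ud) (t0, acc0)
    B.1 = (PySem.List.pyRange 1 (1 + (k : Int)) 1).foldl (pvStepA ud ds) t0 ∧
    B.2 = B.1.getD (PySem.List.pyGetD ds (k : Int) "") PySem.Dict.empty := by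
  intro ds acc0 t0
  induction k with
  | zero =>
    constructor
    · simp
    · rw [List.take_zero, List.foldl_nil, PySem.List.pyGetD_natCast]
      show acc0 = t0.getD ((d0 :: rest).getD 0 "") PySem.Dict.empty
      rw [show (d0 :: rest).getD 0 "" = d0 from rfl]
      exact (PySem.Dict.getD_insert_self _ _ _ _).symm
  | succ k ih =>
    have hk' : k ≤ rest.length := Nat.le_of_succ_le hk
    have hklt : k < rest.length := hk
    obtain ⟨hB1, hB2⟩ := ih hk'
    have htake : rest.take (k + 1) = rest.take k ++ [rest[k]] := by
      rw [List.take_add_one, List.getElem?_eq_getElem hklt]; rfl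
    have hrange : PySem.List.pyRange 1 (1 + ((k + 1 : Nat) : Int)) 1
        = PySem.List.pyRange 1 (1 + (k : Int)) 1 ++ [1 + (k : Int)] := by
      have := PySem.List.pyRange_one_succ_right (a := 1) (b := 1 + (k : Int)) (by omega)
      push_cast
      rw [show (1 : Int) + ((k : Int) + 1) = (1 + (k : Int)) + 1 by omega, this]
    have hprev : PySem.List.pyGetD ds (1 + (k : Int) - 1) "" = PySem.List.pyGetD ds (k : Int) "" := by
      norm_num
    have hcur : PySem.List.pyGetD ds (1 + (k : Int)) "" = rest[k] := by
      rw [show (1 + (k : Int)) = ((k + 1 : Nat) : Int) by push_cast; omega,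
        PySem.List.pyGetD_natCast]
      simp [ds, List.getD, List.getElem?_eq_getElem hklt]
    constructor
    · rw [htake, List.foldl_append, hrange, List.foldl_append]
      simp only [List.foldl_cons, List.foldl_nil]
      rw [← hB1]
      show (pvStepSeq ud _ rest[k]).1 = pvStepA ud ds _ (1 + (k : Int))
      simp only [pvStepSeq, pvStepA, hprev, hcur]
      rw [hB2, hB1]
    · rw [htake, List.foldl_append]
      simp only [List.foldl_cons, List.foldl_nil]
      have hcur' : PySem.List.pyGetD ds ((k + 1 : Nat) : Int) "" = rest[k] := by
        rw [PySem.List.pyGetD_natCast]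
        simp [ds, List.getD, List.getElem?_eq_getElem hklt]
      rw [hcur']
      show (pvStepSeq ud _ rest[k]).2 = (pvStepSeq ud _ rest[k]).1.getD rest[k] PySem.Dict.empty
      simp [pvStepSeq, PySem.Dict.getD_insert_self]

-- ===== VERDICT (by name: the statement is the Claim_ definition above) =====
theorem get_tracking_dict_spec : Claim_equal_get_tracking_dict := by
  intro unique_dict _
  unfold Spec_get_tracking_dict get_tracking_dict get_tracking_dict_alt
  set ud : PySem.Dict String (PySem.Dict String String) :=
    PySem.Dict.ofList (unique_dict.map (fun p => (p.1, PySem.Dict.ofList p.2))) with hud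
  have hndk : ud.keys.Nodup := PySem.Dict.nodup_keys_ofList _
  have hnd : (PySem.List.sorted ud.keys (fun x => x) false).Nodup :=
    ((PySem.List.sorted_perm _ _ _).nodup_iff).mpr hndk
  cases hs : PySem.List.sorted ud.keys (fun x => x) false with
  | nil => simp [hs, PySem.Dict.empty, PySem.List.enumerate_nil]
  | cons d0 rest =>
    rw [hs] at hnd
    simp only [hs]
    congr 1
    -- A side
    have hA := pv_loop_eq ud d0 rest rest.length (le_refl _)
    simp only [List.take_length] at hA
    rw [show ((d0 :: rest).length : Int) = 1 + (rest.length : Int) by simp; omega]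
    rw [← hA.1]
    have hfresh : ∀ d ∈ rest,
        ((PySem.Dict.empty).insert d0 (ud.getD d0 PySem.Dict.empty)).contains d = false := by
      intro d hd
      rw [PySem.Dict.contains_insert]
      have hne : d ≠ d0 := by
        rw [List.nodup_cons] at hnd
        intro h; exact hnd.1 (h ▸ hd)
      simp [hne, PySem.Dict.contains_empty]
    rw [pv_seq ud rest _ _ hfresh ((List.nodup_cons.mp hnd).2)]
    rw [PySem.Dict.items_insert, if_neg (by simp [PySem.Dict.contains_empty])]
    -- B side
    have ht0 : ((d0 :: rest).foldl (fun t d => t.insert d PySem.Dict.empty)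
        (PySem.Dict.empty : PySem.Dict String (PySem.Dict String String))).items
        = [] ++ (d0 :: rest).map (fun d => (d, PySem.Dict.empty)) := by
      have := PySem.Dict.items_foldl_insert_fresh (l := d0 :: rest) (k := fun d => d)
          (v := fun _ => (PySem.Dict.empty : PySem.Dict String String))
          (d := PySem.Dict.empty) (by intro a _; exact PySem.Dict.contains_empty _)
          (by simpa using hnd)
      simpa using this
    have hB := pv_outer ud (d0 :: rest) hnd (d0 :: rest) [] [] PySem.Dict.empty _ rfl rfl ht0
    simp only [List.length_nil, Nat.cast_zero, List.nil_append] at hB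
    rw [hB]
    -- both sides are now explicit snapshot lists
    have hv : pvUpd ud PySem.Dict.empty d0 = ud.getD d0 PySem.Dict.empty := by
      unfold pvUpd
      exact pv_update_empty _ (pv_val_keys_nodup unique_dict d0)
    have hei : (PySem.Dict.empty : PySem.Dict String (PySem.Dict String String)).items = [] := rfl
    simp [pvSnaps, hv, hei]
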